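-- pv_equiv track=rewrite | github.com/erikherrmann1807/advent-of-code-2024 | day01/own_solution/part_two.py | similarityScore
-- ===== SOURCE A (Python) =====
-- from typing import List
--
-- def similarityScore(leftList: List[int], rightList: List[int]) -> int:
--     similarityScore = 0
--     for i in leftList:
--         counter = 0
--         for j in rightList:
--             if i == j:
--                 counter += 1
--         similarityScore += i * counter
--     return similarityScore
-- ===== SOURCE B (Python) =====
-- def similarityScore(leftList, rightList):
--     L = sorted(leftList)
--     R = sorted(rightList)
--     total = 0
--     i = 0
--     j = 0
--     while i < len(L) and j < len(R):
--         if L[i] < R[j]: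
--             i += 1
--         elif R[j] < L[i]:
--             j += 1
--         else:
--             v = L[i]
--             cl = 0
--             while i < len(L) and L[i] == v:
--                 i += 1
--                 cl += 1
--             cr = 0
--             while j < len(R) and R[j] == v:
--                 j += 1
--                 cr += 1
--             total += v * cl * cr
--     return total
-- ===== Notes on version B (the rewrite author's own statement) =====
-- stated objective: faster
-- what changed: Replaces A's nested rescan of rightList for every left element with sorting both lists and a single two-pointer merge that counts runs of equal values once.
import Mathlib
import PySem

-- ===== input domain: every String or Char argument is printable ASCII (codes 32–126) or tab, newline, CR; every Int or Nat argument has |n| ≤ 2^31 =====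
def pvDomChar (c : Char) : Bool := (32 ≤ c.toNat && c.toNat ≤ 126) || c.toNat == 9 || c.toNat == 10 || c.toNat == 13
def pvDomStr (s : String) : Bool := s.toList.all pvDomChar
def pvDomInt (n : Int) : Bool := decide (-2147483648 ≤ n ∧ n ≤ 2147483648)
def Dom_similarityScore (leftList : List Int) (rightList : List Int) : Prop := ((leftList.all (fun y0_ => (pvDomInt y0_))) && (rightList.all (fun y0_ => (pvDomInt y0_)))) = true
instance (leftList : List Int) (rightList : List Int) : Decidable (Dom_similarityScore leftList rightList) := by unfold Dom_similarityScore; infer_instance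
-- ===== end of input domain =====

-- B sorts both lists and accumulates the total in one two-pointer merge over the
-- sorted lists (runs of equal values counted once), instead of A's rescan of
-- rightList for every left element.

-- ===== PORT A =====
def similarityScore (leftList : List Int) (rightList : List Int) : Int :=
  leftList.foldl
    (fun score i =>
      score + i * rightList.foldl (fun counter j => if i == j then counter + 1 else counter) 0)
    0

-- ===== PORT B =====
-- inner while loops of Source B: count the leading run equal to v and return the rest
def pvRun (v : Int) : List Int → Int × List Int
  | [] => (0, [])
  | x :: xs => if x == v then let p := pvRun v xs; (p.1 + 1, p.2) else (0, x :: xs)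

theorem pvRun_snd_length (v : Int) (xs : List Int) : (pvRun v xs).2.length ≤ xs.length := by
  induction xs with
  | nil => simp [pvRun]
  | cons x t ih =>
    simp only [pvRun]
    split
    · simpa using Nat.le_succ_of_le ih
    · simp

-- outer while loop of Source B on the remaining suffixes of the sorted lists
def pvMerge : List Int → List Int → Int
  | [], _ => 0
  | _ :: _, [] => 0
  | a :: ls, b :: rs =>
    if a < b then pvMerge ls (b :: rs)
    else if b < a then pvMerge (a :: ls) rs
    else
      let p := pvRun a (a :: ls)
      let q := pvRun a (b :: rs)
      a * p.1 * q.1 + pvMerge p.2 q.2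
termination_by L R => L.length + R.length
decreasing_by
  · simp only [List.length_cons]; omega
  · simp only [List.length_cons]; omega
  · have hb : a = b := by omega
    have h1 : (pvRun a (a :: ls)).2.length ≤ ls.length := by
      simpa [pvRun] using pvRun_snd_length a ls
    have h2 : (pvRun a (b :: rs)).2.length ≤ rs.length := by
      rw [← hb]; simpa [pvRun] using pvRun_snd_length a rs
    simp only [List.length_cons]
    omega

def similarityScore_alt (leftList : List Int) (rightList : List Int) : Int :=
  pvMerge (PySem.List.sorted leftList (fun x => x) false)
          (PySem.List.sorted rightList (fun x => x) false)

-- ===== PRECONDITION & SPEC =====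
def Spec_similarityScore (leftList : List Int) (rightList : List Int) (out : Int) : Prop := out = similarityScore_alt leftList rightList
instance (leftList : List Int) (rightList : List Int) (out : Int) : Decidable (Spec_similarityScore leftList rightList out) := by unfold Spec_similarityScore; infer_instance

-- ===== CLAIM =====
def Claim_equal_similarityScore : Prop := ∀ (leftList : List Int) (rightList : List Int), Dom_similarityScore leftList rightList → Spec_similarityScore leftList rightList (similarityScore leftList rightList)

-- ===== LEMMAS AND PROOFS =====

-- A's inner loop counts occurrences of i in rightList.
theorem simA_inner (i : Int) (r : List Int) (a : Int) :
    r.foldl (fun counter j => if i == j then counter + 1 else counter) a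
      = a + (r.count i : Int) := by
  induction r generalizing a with
  | nil => simp
  | cons x t ih =>
    simp only [List.foldl_cons, List.count_cons, ih]
    by_cases h : i = x
    · simp [h]; ring
    · simp [h, Ne.symm h, beq_iff_eq]

theorem simA_eq_sum (leftList rightList : List Int) :
    similarityScore leftList rightList
      = (leftList.map (fun i => i * (rightList.count i : Int))).sum := by
  unfold similarityScore
  have h : (fun score i =>
        score + i * rightList.foldl (fun counter j => if i == j then counter + 1 else counter) 0)
      = (fun score i => score + i * (rightList.count i : Int)) := by
    funext s i; rw [simA_inner]; simp
  rw [h, PySem.List.foldl_add]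
  simp

-- pvRun is takeWhile-length / dropWhile.
theorem pvRun_eq (v : Int) (xs : List Int) :
    pvRun v xs = (((xs.takeWhile (fun x => x == v)).length : Int),
                  xs.dropWhile (fun x => x == v)) := by
  induction xs with
  | nil => simp [pvRun]
  | cons x t ih =>
    simp only [pvRun]
    by_cases h : x = v
    · simp [h, ih]
    · simp [h]

theorem dropWhile_gt (v : Int) (xs : List Int)
    (hs : xs.Pairwise (· ≤ ·)) (hlb : ∀ y ∈ xs, v ≤ y) :
    ∀ y ∈ xs.dropWhile (fun x => x == v), v < y := by
  have hsub : (xs.dropWhile (fun x => x == v)).Sublist xs := List.dropWhile_sublist _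
  cases hd : xs.dropWhile (fun x => x == v) with
  | nil => simp
  | cons w t =>
    have hw : ¬ (w == v) = true := by
      have := List.head?_dropWhile_not (p := fun x : Int => x == v) (l := xs)
      rw [hd] at this; simpa using this
    have hwv : v < w := by
      have hmem : w ∈ xs := hsub.mem (by simp [hd])
      have := hlb w hmem
      simp at hw; omega
    have hp : (w :: t).Pairwise (· ≤ ·) := hd ▸ hs.sublist hsub
    intro y hy
    rcases List.mem_cons.mp hy with rfl | hyt
    · exact hwv
    · have := (List.pairwise_cons.mp hp).1 y hyt
      omega

theorem takeWhile_all_eq (v : Int) (xs : List Int) :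
    ∀ y ∈ xs.takeWhile (fun x => x == v), y = v := by
  intro y hy
  have := List.mem_takeWhile_imp hy
  simpa using this

-- main merge invariant: on sorted lists the merge computes the similarity sum
theorem merge_spec (n : Nat) : ∀ (L R : List Int), L.length + R.length ≤ n →
    L.Pairwise (· ≤ ·) → R.Pairwise (· ≤ ·) →
    pvMerge L R = (L.map (fun i => i * (R.count i : Int))).sum := by
  induction n with
  | zero =>
    intro L R hlen _ _
    have : L = [] := by cases L <;> simp_all
    subst this
    cases R <;> simp [pvMerge]
  | succ n ih =>
    intro L R hlen hL hR
    match L, R with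
    | [], _ => simp [pvMerge]
    | _ :: _, [] => simp [pvMerge, List.count_nil]
    | a :: ls, b :: rs =>
      by_cases hab : a < b
      · -- a smaller than everything in R: count = 0
        have hcnt : (b :: rs).count a = 0 := by
          rw [List.count_eq_zero]
          intro hmem
          rcases List.mem_cons.mp hmem with rfl | h
          · omega
          · have := (List.pairwise_cons.mp hR).1 a h; omega
        have : pvMerge (a :: ls) (b :: rs) = pvMerge ls (b :: rs) := by
          rw [pvMerge]; simp [hab]
        rw [this, ih ls (b :: rs) (by simp at hlen ⊢; omega) hL.of_cons hR]
        simp [hcnt]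
      · by_cases hba : b < a
        · -- b smaller than everything in L: dropping it changes no count
          have hmap : ((a :: ls).map (fun i => i * (((b :: rs).count i : Nat) : Int)))
              = ((a :: ls).map (fun i => i * ((rs.count i : Nat) : Int))) := by
            apply List.map_congr_left
            intro i hi
            have hia : a ≤ i := by
              rcases List.mem_cons.mp hi with rfl | h
              · omega
              · exact (List.pairwise_cons.mp hL).1 i h
            have hne : i ≠ b := by omega
            rw [List.count_cons]
            have : (b == i) = false := by simp; omega
            rw [this]
            simp
          have : pvMerge (a :: ls) (b :: rs) = pvMerge (a :: ls) rs := by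
            rw [pvMerge]; simp [hab, hba]
          rw [this, ih (a :: ls) rs (by simp at hlen ⊢; omega) hL hR.of_cons, hmap]
        · -- a = b: peel the equal runs from both lists
          have hb : a = b := by omega
          subst hb
          set tL := (a :: ls).takeWhile (fun x => x == a) with htL
          set dL := (a :: ls).dropWhile (fun x => x == a) with hdL
          set tR := (a :: rs).takeWhile (fun x => x == a) with htR
          set dR := (a :: rs).dropWhile (fun x => x == a) with hdR
          have hLsplit : tL ++ dL = a :: ls := List.takeWhile_append_dropWhile
          have hRsplit : tR ++ dR = a :: rs := List.takeWhile_append_dropWhile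
          have hlbL : ∀ y ∈ (a :: ls), a ≤ y := by
            intro y hy
            rcases List.mem_cons.mp hy with rfl | h
            · omega
            · exact (List.pairwise_cons.mp hL).1 y h
          have hlbR : ∀ y ∈ (a :: rs), a ≤ y := by
            intro y hy
            rcases List.mem_cons.mp hy with rfl | h
            · omega
            · exact (List.pairwise_cons.mp hR).1 y h
          have hgtL := dropWhile_gt a (a :: ls) hL hlbL
          have hgtR := dropWhile_gt a (a :: rs) hR hlbR
          have htLlen : 1 ≤ tL.length := by
            rw [htL, List.takeWhile_cons]; simp
          have hdLsorted : dL.Pairwise (· ≤ ·) := hL.sublist (List.dropWhile_sublist _)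
          have hdRsorted : dR.Pairwise (· ≤ ·) := hR.sublist (List.dropWhile_sublist _)
          -- count of a in R is tR.length
          have hcntR : ((a :: rs).count a : Int) = (tR.length : Int) := by
            have : (a :: rs).count a = tR.count a + dR.count a := by
              rw [← hRsplit, List.count_append]
            have h1 : tR.count a = tR.length := by
              rw [List.count_eq_length]
              intro y hy
              have := takeWhile_all_eq a (a :: rs) y hy
              simp [this]
            have h2 : dR.count a = 0 := by
              rw [List.count_eq_zero]
              intro hmem
              have := hgtR a hmem; omega
            omega
          -- merge step
          have hstep : pvMerge (a :: ls) (a :: rs)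
              = a * (tL.length : Int) * (tR.length : Int) + pvMerge dL dR := by
            rw [pvMerge]
            simp only [lt_self_iff_false, if_false]
            rw [pvRun_eq, pvRun_eq]
          -- sum over tL: every element is a
          have hsum_tL : (tL.map (fun i => i * (((a :: rs).count i : Nat) : Int))).sum
              = (tL.length : Int) * (a * (tR.length : Int)) := by
            have hrepl : tL = List.replicate tL.length a :=
              List.eq_replicate_of_mem (takeWhile_all_eq a (a :: ls))
            conv_lhs => rw [hrepl]
            rw [List.map_replicate, List.sum_replicate, nsmul_eq_mul, hcntR]
          -- sum over dL: counts unchanged by removing the a-run from R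
          have hsum_dL : (dL.map (fun i => i * (((a :: rs).count i : Nat) : Int))).sum
              = (dL.map (fun i => i * ((dR.count i : Nat) : Int))).sum := by
            congr 1
            apply List.map_congr_left
            intro i hi
            have hia : a < i := hgtL i hi
            have : (a :: rs).count i = tR.count i + dR.count i := by
              rw [← hRsplit, List.count_append]
            have htR0 : tR.count i = 0 := by
              rw [List.count_eq_zero]
              intro hmem
              have := takeWhile_all_eq a (a :: rs) i hmem
              omega
            rw [this, htR0]; simp
          have hlen' : dL.length + dR.length ≤ n := by
            have h1 := List.length_dropWhile_le (p := fun x : Int => x == a) (l := a :: ls)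
            have h2 : dL.length + tL.length = ls.length + 1 := by
              have := congrArg List.length hLsplit
              simp at this; omega
            have h3 : dR.length ≤ (a :: rs).length := List.length_dropWhile_le _ _
            simp at hlen h3
            omega
          rw [hstep, ih dL dR hlen' hdLsorted hdRsorted]
          have : ((a :: ls).map (fun i => i * (((a :: rs).count i : Nat) : Int))).sum
              = (tL.map (fun i => i * (((a :: rs).count i : Nat) : Int))).sum
                + (dL.map (fun i => i * (((a :: rs).count i : Nat) : Int))).sum := by
            rw [← hLsplit]; simp
          rw [this, hsum_tL, hsum_dL]
          ring

-- ===== VERDICT =====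
theorem similarityScore_spec : Claim_equal_similarityScore := by
  intro leftList rightList _
  unfold Spec_similarityScore similarityScore_alt
  rw [simA_eq_sum]
  set sL := PySem.List.sorted leftList (fun x => x) false with hsL
  set sR := PySem.List.sorted rightList (fun x => x) false with hsR
  have hpL : sL.Pairwise (· ≤ ·) := by
    simpa using PySem.List.sorted_pairwise (xs := leftList) (key := fun x : Int => x)
  have hpR : sR.Pairwise (· ≤ ·) := by
    simpa using PySem.List.sorted_pairwise (xs := rightList) (key := fun x : Int => x)
  rw [merge_spec (sL.length + sR.length) sL sR (le_refl _) hpL hpR]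
  have hpermL : sL.Perm leftList := PySem.List.sorted_perm _ _ _
  have hpermR : sR.Perm rightList := PySem.List.sorted_perm _ _ _
  have hcnt : (sL.map (fun i => i * ((sR.count i : Nat) : Int)))
      = (sL.map (fun i => i * ((rightList.count i : Nat) : Int))) := by
    apply List.map_congr_left
    intro i _
    rw [hpermR.count_eq]
  rw [hcnt]
  exact ((hpermL.map _).sum_eq).symm
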